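-- pv_equiv track=rewrite | github.com/morozsm/icom-lan | docs/plans/discovery-artifacts/discovery_graph.py | _canonicalise
-- ===== SOURCE A (Python) =====
-- def _canonicalise(target: str, internal_modules: set[str]) -> str:
--     """Map a dotted import target to its closest internal module/package node.
--
--     If the exact path exists in the internal map, use it. Otherwise walk up
--     the parents and pick the closest one that does.
--     """
--     if target in internal_modules:
--         return target
--     parts = target.split(".")
--     while parts:
--         candidate = ".".join(parts)
--         if candidate in internal_modules:
--             return candidate
--         parts.pop()
--     return target  # should not happen if _is_internal() returned True
-- ===== SOURCE B (Python) =====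
-- def _canonicalise(target: str, internal_modules: set[str]) -> str:
--     """Single forward scan: accumulate dotted prefixes left-to-right and
--     keep the longest one found in internal_modules; fall back to target."""
--     parts = target.split(".")
--     prefix = parts[0]
--     best = prefix if prefix in internal_modules else target
--     for part in parts[1:]:
--         prefix = prefix + "." + part
--         if prefix in internal_modules:
--             best = prefix
--     return best
-- ===== Notes on version B (the rewrite author's own statement) =====
-- stated objective: alternative
-- what changed: Replaces A's trim-from-the-end loop (split, repeatedly join all parts and pop the last, returning on the first hit) by a single forward scan that accumulates the dotted prefix left-to-right and keeps the longest prefix found in internal_modules, falling back to target.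
import Mathlib
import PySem

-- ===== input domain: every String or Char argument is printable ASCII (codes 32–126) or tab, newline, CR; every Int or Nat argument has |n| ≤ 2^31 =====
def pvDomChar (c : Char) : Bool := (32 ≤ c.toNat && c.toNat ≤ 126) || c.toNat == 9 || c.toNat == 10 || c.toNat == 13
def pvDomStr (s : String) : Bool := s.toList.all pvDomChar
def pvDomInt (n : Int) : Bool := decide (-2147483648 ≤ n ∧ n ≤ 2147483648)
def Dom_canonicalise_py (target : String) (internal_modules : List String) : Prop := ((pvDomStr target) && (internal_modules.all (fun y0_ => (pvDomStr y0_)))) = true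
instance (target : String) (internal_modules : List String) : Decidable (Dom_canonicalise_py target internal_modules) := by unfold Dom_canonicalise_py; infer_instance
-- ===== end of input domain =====

-- B replaces A's trim-from-the-end loop by one forward scan keeping the longest internal prefix (alternative decomposition, same result).

-- ===== PORT A =====
-- the 'while parts: candidate = ".".join(parts); … ; parts.pop()' loop, fallback = target
def canonAWhile (internal_modules : List String) (target : String) : List String → String
  | [] => target
  | p :: ps =>
      let candidate := PySem.Str.join "." (p :: ps)
      if internal_modules.contains candidate then candidate
      else canonAWhile internal_modules target ((p :: ps).dropLast)
  termination_by parts => parts.length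
  decreasing_by simp

def canonicalise_py (target : String) (internal_modules : List String) : String :=
  if internal_modules.contains target then target
  else canonAWhile internal_modules target ((PySem.Str.split? target ".").getD [])

-- ===== PORT B =====
def canonicalise_py_alt (target : String) (internal_modules : List String) : String :=
  match (PySem.Str.split? target ".").getD [] with
  | [] => target  -- unreachable: str.split(".") never returns an empty list
  | p :: rest =>
      let best := if internal_modules.contains p then p else target
      (rest.foldl (fun (st : String × String) part =>
          let pr := st.1 ++ "." ++ part
          (pr, if internal_modules.contains pr then pr else st.2)) (p, best)).2

-- ===== PRECONDITION & SPEC =====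
def Spec_canonicalise_py (target : String) (internal_modules : List String) (out : String) : Prop := out = canonicalise_py_alt target internal_modules
instance (target : String) (internal_modules : List String) (out : String) : Decidable (Spec_canonicalise_py target internal_modules out) := by unfold Spec_canonicalise_py; infer_instance

-- ===== CLAIM (what is proved, stated in full; the proofs are below) =====
def Claim_equal_canonicalise_py : Prop := ∀ (target : String) (internal_modules : List String), Dom_canonicalise_py target internal_modules → Spec_canonicalise_py target internal_modules (canonicalise_py target internal_modules)

-- ===== LEMMAS AND PROOFS =====

-- splitOn.go never returns the empty list
theorem pv_go_ne_nil (sep : List Char) (fuel : Nat) (l cur : List Char) (acc : List (List Char)) :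
    PySem.Chars.splitOn.go sep fuel l cur acc ≠ [] := by
  induction fuel generalizing l cur acc with
  | zero => simp [PySem.Chars.splitOn.go]
  | succ f ih =>
      cases l with
      | nil => simp [PySem.Chars.splitOn.go]
      | cons c rest =>
          rw [PySem.Chars.splitOn.go]
          split_ifs <;> exact ih _ _ _

-- accumulator unfolding for splitOn.go
theorem pv_go_acc (sep : List Char) (fuel : Nat) (l cur : List Char) (acc : List (List Char)) :
    PySem.Chars.splitOn.go sep fuel l cur acc = acc.reverse ++ PySem.Chars.splitOn.go sep fuel l cur [] := by
  induction fuel generalizing l cur acc with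
  | zero => simp [PySem.Chars.splitOn.go]
  | succ f ih =>
      cases l with
      | nil => simp [PySem.Chars.splitOn.go]
      | cons c rest =>
          rw [PySem.Chars.splitOn.go, PySem.Chars.splitOn.go]
          split_ifs with h
          · rw [ih _ _ (cur.reverse :: acc), ih _ _ [cur.reverse]]
            simp
          · exact ih _ _ _

-- joining splitOn.go's pieces restores cur.reverse ++ l (for enough fuel)
theorem pv_go_join (sep : List Char) (hsep : sep ≠ []) (fuel : Nat) (l cur : List Char)
    (hf : l.length ≤ fuel) :
    PySem.Chars.join sep (PySem.Chars.splitOn.go sep fuel l cur []) = cur.reverse ++ l := by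
  induction fuel generalizing l cur with
  | zero =>
      have : l = [] := List.length_eq_zero_iff.mp (Nat.le_zero.mp hf)
      subst this
      simp [PySem.Chars.splitOn.go, PySem.Chars.join_singleton]
  | succ f ih =>
      cases l with
      | nil => simp [PySem.Chars.splitOn.go, PySem.Chars.join_singleton]
      | cons c rest =>
          rw [PySem.Chars.splitOn.go]
          split_ifs with h
          · rw [pv_go_acc]
            have hpre : sep <+: (c :: rest) := List.isPrefixOf_iff_prefix.mp h
            have hlen : sep.length ≤ (c :: rest).length := hpre.length_le
            have hpos : 0 < sep.length := List.length_pos_iff.mpr hsep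
            have hdrop : ((c :: rest).drop sep.length).length ≤ f := by
              simp only [List.length_drop, List.length_cons]
              simp only [List.length_cons] at hf
              omega
            obtain ⟨q, qs, hq⟩ : ∃ q qs, PySem.Chars.splitOn.go sep f ((c :: rest).drop sep.length) [] [] = q :: qs := by
              cases hgo : PySem.Chars.splitOn.go sep f ((c :: rest).drop sep.length) [] [] with
              | nil => exact absurd hgo (pv_go_ne_nil _ _ _ _ _)
              | cons q qs => exact ⟨q, qs, rfl⟩
            have hjoin := ih ((c :: rest).drop sep.length) [] hdrop
            rw [hq] at hjoin ⊢
            simp only [List.reverse_nil, List.nil_append] at hjoin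
            simp only [List.reverse_singleton, List.singleton_append]
            rw [PySem.Chars.join_cons_cons, hjoin]
            have hsplit : sep ++ (c :: rest).drop sep.length = c :: rest := by
              obtain ⟨t, ht⟩ := hpre
              rw [← ht, List.drop_left]
            rw [List.append_assoc, hsplit]
          · have := ih rest (c :: cur) (by simpa using Nat.succ_le_succ_iff.mp (by simpa using hf))
            rw [this]
            simp

-- '.'.join(s.split('.')) == s
theorem pv_join_splitOn (s : List Char) :
    PySem.Chars.join ['.'] (PySem.Chars.splitOn s ['.']) = s := by
  have := pv_go_join ['.'] (by simp) (s.length + 1) s [] (by omega)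
  simpa [PySem.Chars.splitOn] using this

theorem pv_split_eq (target : String) :
    (PySem.Str.split? target ".").getD [] =
      (PySem.Chars.splitOn target.toList ['.']).map String.ofList := by
  have h := PySem.Str.split?_map target "."
  cases hs : PySem.Str.split? target "." with
  | none => simp [hs, PySem.Chars.split?] at h
  | some parts =>
      rw [hs] at h
      simp only [Option.map_some, PySem.Chars.split?] at h
      have hpl : parts.map String.toList = PySem.Chars.splitOn target.toList ['.'] := by
        simpa using h
      rw [Option.getD_some, ← hpl, List.map_map]
      have : parts.map (String.ofList ∘ String.toList) = parts.map id :=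
        List.map_congr_left (fun x _ => by simp)
      simp [this]

theorem pv_join_split (target : String) :
    PySem.Str.join "." ((PySem.Str.split? target ".").getD []) = target := by
  apply String.toList_injective
  rw [pv_split_eq, PySem.Str.toList_join, List.map_map]
  have hcomp : (PySem.Chars.splitOn target.toList ['.']).map (String.toList ∘ String.ofList)
      = (PySem.Chars.splitOn target.toList ['.']).map id :=
    List.map_congr_left (fun x _ => by simp)
  rw [hcomp, List.map_id]
  exact pv_join_splitOn target.toList

theorem pv_split_ne_nil (target : String) :
    (PySem.Str.split? target ".").getD [] ≠ [] := by
  rw [pv_split_eq]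
  simp only [ne_eq, List.map_eq_nil_iff]
  exact pv_go_ne_nil _ _ _ _ _

-- Str-level join unfoldings
theorem pv_str_join_singleton (p : String) : PySem.Str.join "." [p] = p := by
  apply String.toList_injective
  rw [PySem.Str.toList_join]
  simp [PySem.Chars.join_singleton]

theorem pv_str_join_cons_cons (p q : String) (rest : List String) :
    PySem.Str.join "." (p :: q :: rest) = p ++ "." ++ PySem.Str.join "." (q :: rest) := by
  apply String.toList_injective
  rw [PySem.Str.toList_join]
  simp [PySem.Chars.join_cons_cons, PySem.Str.toList_join]

-- running-prefix form of join
theorem pv_join_foldl (rest : List String) (p : String) :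
    PySem.Str.join "." (p :: rest) = rest.foldl (fun a r => a ++ "." ++ r) p := by
  induction rest generalizing p with
  | nil => simp [pv_str_join_singleton]
  | cons x r ih =>
      rw [pv_str_join_cons_cons]
      cases r with
      | nil => simp [pv_str_join_singleton]
      | cons y r' =>
          rw [List.foldl_cons, ← ih (p ++ "." ++ x), pv_str_join_cons_cons,
            pv_str_join_cons_cons]
          simp [String.append_assoc]

-- the B fold's first component is the running dotted prefix
theorem pv_fold_fst (internal_modules : List String) (rest : List String) (p b : String) :
    (rest.foldl (fun (st : String × String) part =>
        let pr := st.1 ++ "." ++ part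
        (pr, if internal_modules.contains pr then pr else st.2)) (p, b)).1
      = rest.foldl (fun a r => a ++ "." ++ r) p := by
  induction rest generalizing p b with
  | nil => rfl
  | cons x r ih => simp only [List.foldl_cons]; exact ih _ _

-- MAIN: B's forward fold equals A's trim-from-the-end loop
theorem pv_main (internal_modules : List String) (rest : List String) (p b : String) :
    (rest.foldl (fun (st : String × String) part =>
        let pr := st.1 ++ "." ++ part
        (pr, if internal_modules.contains pr then pr else st.2))
      (p, if internal_modules.contains p then p else b)).2
      = canonAWhile internal_modules b (p :: rest) := by
  induction rest using List.reverseRecOn with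
  | nil =>
      rw [canonAWhile]
      simp [pv_str_join_singleton, canonAWhile]
  | append_singleton r x ih =>
      rw [List.foldl_append, List.foldl_cons, List.foldl_nil]
      rw [canonAWhile]
      have hjoin : PySem.Str.join "." (p :: (r ++ [x])) =
          (r.foldl (fun a s => a ++ "." ++ s) p) ++ "." ++ x := by
        rw [pv_join_foldl, List.foldl_append, List.foldl_cons, List.foldl_nil]
      have hdrop : (p :: (r ++ [x])).dropLast = p :: r := by
        rw [← List.cons_append]
        exact List.dropLast_concat ..
      rw [hjoin, hdrop]
      simp only [pv_fold_fst internal_modules r p (if internal_modules.contains p then p else b), ih]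

-- ===== VERDICT (by name: the statement is the Claim_ definition above) =====
theorem canonicalise_py_spec : Claim_equal_canonicalise_py := by
  intro target internal_modules _
  unfold Spec_canonicalise_py canonicalise_py canonicalise_py_alt
  cases hsplit : (PySem.Str.split? target ".").getD [] with
  | nil => exact absurd hsplit (pv_split_ne_nil target)
  | cons p rest =>
      have hjoin : PySem.Str.join "." (p :: rest) = target := by
        rw [← hsplit]; exact pv_join_split target
      dsimp only
      rw [pv_main]
      by_cases hc : internal_modules.contains target = true
      · rw [if_pos hc, canonAWhile, hjoin, if_pos hc]
      · rw [if_neg hc]
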